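-- pv_equiv track=rewrite | github.com/arcorck/DUT-AS | algo-progra/p1/tp supplémentaire/prononcable.py | est_prononcable
-- ===== SOURCE A (Python) =====
-- def est_prononcable(mot):
--     """ fonction qui renvoie un booleen indiquant si le mot est prononcable ou non
--     Il est prononcable si il ne contient pas de suite de plus de 4 voyelles ou 4 consonnes
--     paramètre :
--         - mot : un mot pour lequel on test sa prononciabilité"""
--     prononcable = True
--     voyelle = 'aeiouy'
--     suite_voyelle = 0
--     suite_consonne = 0
--     if len(mot) !=  0:
--         for char in mot :
--             if char in voyelle :
--                 suite_voyelle += 1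
--                 suite_consonne = 0
--             else:
--                 suite_consonne += 1
--                 suite_voyelle = 0
--             if suite_voyelle >= 4 or suite_consonne >= 4 :
--                 prononcable = False
--     else :
--         prononcable = False
--     return prononcable
-- ===== SOURCE B (Python) =====
-- def est_prononcable(mot):
--     """Classify-then-scan re-implementation: map each char to its vowel/consonant
--     class, then test every window of 4 consecutive classes for uniformity."""
--     if not mot:
--         return False
--     v = [c in 'aeiouy' for c in mot]
--     return not any(v[i] == v[i + 1] == v[i + 2] == v[i + 3]
--                    for i in range(len(v) - 3))
-- ===== Notes on version B (the rewrite author's own statement) =====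
-- stated objective: alternative
-- what changed: Replaced the dual vowel/consonant run counters maintained in one imperative loop by a classify-then-scan decomposition: map each character to a boolean vowel class, then test every window of 4 consecutive classes for uniformity with any() over a generator.
import Mathlib
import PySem

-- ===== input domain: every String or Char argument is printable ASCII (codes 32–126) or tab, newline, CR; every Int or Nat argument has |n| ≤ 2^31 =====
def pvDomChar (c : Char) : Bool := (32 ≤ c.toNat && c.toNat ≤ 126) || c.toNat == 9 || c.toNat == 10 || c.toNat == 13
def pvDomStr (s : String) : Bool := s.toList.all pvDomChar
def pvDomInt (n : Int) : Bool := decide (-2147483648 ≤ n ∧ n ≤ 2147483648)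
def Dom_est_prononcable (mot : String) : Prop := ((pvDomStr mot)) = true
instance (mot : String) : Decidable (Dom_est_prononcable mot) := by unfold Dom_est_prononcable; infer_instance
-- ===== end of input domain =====

-- B replaces A's two imperative run counters by a classify-then-scan over 4-windows (alternative decomposition, same linear pass).

-- ===== PORT A =====
-- literal port of A: one pass with two Int run counters reset on class change;
-- 'char in voyelle' (a single character against a string of distinct letters) is exactly membership, ported as list contains
def est_prononcable (mot : String) : Bool :=
  let voyelle := "aeiouy"
  if PySem.Str.len mot ≠ 0 then
    (mot.toList.foldl
      (fun (st : Bool × Int × Int) char =>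
        let pron := st.1
        let sv := st.2.1
        let sc := st.2.2
        let (sv, sc) := if voyelle.toList.contains char then (sv + 1, (0 : Int)) else ((0 : Int), sc + 1)
        ((if sv ≥ 4 || sc ≥ 4 then false else pron), sv, sc))
      (true, 0, 0)).1
  else false

-- ===== PORT B =====
-- literal port of Source B: classification list v, then not/any over windows of 4 (indices of range(len(v)-3) are always in range)
def est_prononcable_alt (mot : String) : Bool :=
  if mot.toList = [] then false
  else
    let v := mot.toList.map (fun c => "aeiouy".toList.contains c)
    ! ((List.range (v.length - 3)).any (fun i =>
        (v.getD i false == v.getD (i + 1) false) &&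
        (v.getD (i + 1) false == v.getD (i + 2) false) &&
        (v.getD (i + 2) false == v.getD (i + 3) false)))

-- ===== PRECONDITION & SPEC =====
def Spec_est_prononcable (mot : String) (out : Bool) : Prop := out = est_prononcable_alt mot
instance (mot : String) (out : Bool) : Decidable (Spec_est_prononcable mot out) := by unfold Spec_est_prononcable; infer_instance

-- ===== CLAIM (what is proved, stated in full; the proofs are below) =====
def Claim_equal_est_prononcable : Prop := ∀ (mot : String), Dom_est_prononcable mot → Spec_est_prononcable mot (est_prononcable mot)

-- ===== LEMMAS AND PROOFS =====

-- A's loop step, expressed over the boolean vowel class of the character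
def pvStep (st : Bool × Int × Int) (x : Bool) : Bool × Int × Int :=
  let pron := st.1
  let sv := st.2.1
  let sc := st.2.2
  let (sv, sc) := if x then (sv + 1, (0 : Int)) else ((0 : Int), sc + 1)
  ((if sv ≥ 4 || sc ≥ 4 then false else pron), sv, sc)

-- B's window test over the class list
def pvWin (v : List Bool) : Bool :=
  (List.range (v.length - 3)).any (fun i =>
    (v.getD i false == v.getD (i + 1) false) &&
    (v.getD (i + 1) false == v.getD (i + 2) false) &&
    (v.getD (i + 2) false == v.getD (i + 3) false))

-- "no run of 4 equal classes", as a structural recursion: the common reference point of both ports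
def pvNoRun : List Bool → Bool
  | a :: b :: c :: d :: t => if a == b && b == c && c == d then false else pvNoRun (b :: c :: d :: t)
  | _ => true

lemma pvWin_cons (a b c d : Bool) (t : List Bool) :
    pvWin (a :: b :: c :: d :: t)
      = ((a == b && b == c && c == d) || pvWin (b :: c :: d :: t)) := by
  have hlen : (a :: b :: c :: d :: t).length - 3 = ((b :: c :: d :: t).length - 3) + 1 := by simp
  rw [pvWin, pvWin, hlen, List.range_succ_eq_map, List.any_cons, List.any_map]
  congr 1

lemma pvWin_eq (l : List Bool) : pvNoRun l = ! pvWin l := by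
  induction l using pvNoRun.induct with
  | case1 a b c d t h => rw [pvNoRun, pvWin_cons]; simp [h]
  | case2 a b c d t h ih =>
    have hc : (a == b && b == c && c == d) = false := Bool.eq_false_iff.mpr h
    rw [pvNoRun, pvWin_cons, if_neg h, ih, hc]
    simp
  | case3 l h =>
    have hl : l.length - 3 = 0 := by
      match l, h with
      | [], _ => rfl
      | [a], _ => rfl
      | [a, b], _ => rfl
      | [a, b, c], _ => rfl
      | a :: b :: c :: d :: t, h => exact absurd rfl (h a b c d t)
    have h2 : pvNoRun l = true := by
      match l, h with
      | [], _ => rfl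
      | [a], _ => rfl
      | [a, b], _ => rfl
      | [a, b, c], _ => rfl
      | a :: b :: c :: d :: t, h => exact absurd rfl (h a b c d t)
    rw [h2, pvWin, hl]
    rfl

-- once prononcable is false, A's loop keeps it false
lemma pvMono (l : List Bool) (s : Int × Int) : (l.foldl pvStep (false, s)).1 = false := by
  induction l generalizing s with
  | nil => rfl
  | cons x t ih =>
    simp only [List.foldl_cons, pvStep]
    split <;> split <;> exact ih _

lemma pvMism1 (a x : Bool) (h : a ≠ x) (t : List Bool) : pvNoRun (a :: x :: t) = pvNoRun (x :: t) := by
  match t with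
  | [] => cases a <;> cases x <;> simp_all [pvNoRun]
  | [c] => cases a <;> cases x <;> simp_all [pvNoRun]
  | c :: d :: t' =>
    have hax : (a == x) = false := by cases a <;> cases x <;> simp_all
    simp [pvNoRun, hax]

lemma pvMism2 (a x : Bool) (h : a ≠ x) (t : List Bool) : pvNoRun (a :: a :: x :: t) = pvNoRun (x :: t) := by
  match t with
  | [] => cases a <;> cases x <;> simp_all [pvNoRun]
  | [c] => cases a <;> cases x <;> simp_all [pvNoRun]
  | c :: d :: t' =>
    have hax : (a == x) = false := by cases a <;> cases x <;> simp_all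
    simp [pvNoRun, hax]

lemma pvMism3 (a x : Bool) (h : a ≠ x) (t : List Bool) : pvNoRun (a :: a :: a :: x :: t) = pvNoRun (x :: t) := by
  have hax : (a == x) = false := by cases a <;> cases x <;> simp_all
  simp [pvNoRun, hax, pvMism2 a x h]

-- a class change kills every window crossing the boundary
lemma pvMism (k : Nat) (hk : k ≤ 3) (a x : Bool) (h : a ≠ x) (t : List Bool) :
    pvNoRun (List.replicate k a ++ x :: t) = pvNoRun (x :: t) := by
  interval_cases k
  · rfl
  · exact pvMism1 a x h t
  · exact pvMism2 a x h t
  · exact pvMism3 a x h t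

lemma pvShort (b : Bool) (k : Nat) (hk : k ≤ 3) : pvNoRun (List.replicate k b) = true := by
  interval_cases k <;> cases b <;> decide

lemma pvRepl (b : Bool) (k : Nat) (t : List Bool) :
    List.replicate k b ++ b :: t = List.replicate (k + 1) b ++ t := by
  rw [List.replicate_succ']
  simp

-- loop invariant: the live counter k records the run of equal classes b just consumed
lemma pvKey (l : List Bool) (p b : Bool) (k : Nat) (hk : k ≤ 3) :
    (l.foldl pvStep (p, (if b then ((k : Int), (0 : Int)) else ((0 : Int), (k : Int))))).1
      = (p && pvNoRun (List.replicate k b ++ l)) := by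
  induction l generalizing p b k with
  | nil =>
    simp [pvShort b k hk]
  | cons x t ih =>
    by_cases hxb : x = b
    · subst hxb
      by_cases hk3 : k = 3
      · subst hk3
        have hstep : pvStep (p, (if x then (((3 : Nat) : Int), (0 : Int)) else ((0 : Int), ((3 : Nat) : Int)))) x
            = (false, (if x then ((4 : Int), (0 : Int)) else ((0 : Int), (4 : Int)))) := by
          cases x <;> simp [pvStep]
        rw [List.foldl_cons, hstep, pvMono]
        have h4 : pvNoRun (List.replicate 3 x ++ x :: t) = false := by
          rw [pvRepl]
          cases x <;> simp [pvNoRun]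
        rw [h4]
        simp
      · have hstep : pvStep (p, (if x then ((k : Int), (0 : Int)) else ((0 : Int), (k : Int)))) x
            = (p, (if x then (((k + 1 : Nat) : Int), (0 : Int)) else ((0 : Int), ((k + 1 : Nat) : Int)))) := by
          have h4 : ¬ ((k : Int) + 1 ≥ 4) := by omega
          cases x <;> simp [pvStep, h4]
        rw [List.foldl_cons, hstep, ih p x (k + 1) (by omega), pvRepl]
    · have hstep : pvStep (p, (if b then ((k : Int), (0 : Int)) else ((0 : Int), (k : Int)))) x
          = (p, (if x then (((1 : Nat) : Int), (0 : Int)) else ((0 : Int), ((1 : Nat) : Int)))) := by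
        cases x <;> cases b <;> simp_all [pvStep]
      rw [List.foldl_cons, hstep, ih p x 1 (by omega)]
      rw [pvMism k hk b x (fun hh => hxb hh.symm) t]
      rfl

lemma pvMain (mot : String) : est_prononcable mot = est_prononcable_alt mot := by
  rw [est_prononcable, est_prononcable_alt]
  have hlen : PySem.Str.len mot = (mot.toList.length : Int) := by simp [PySem.Str.len_eq]
  by_cases h : mot.toList = []
  · simp [h]
  · have hne : PySem.Str.len mot ≠ 0 := by
      rw [hlen]
      intro hc
      exact h (List.length_eq_zero_iff.mp (by exact_mod_cast hc))
    rw [if_pos hne, if_neg h]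
    have hkey := pvKey (mot.toList.map (fun c => "aeiouy".toList.contains c)) true true 0 (by omega)
    simp only [Nat.cast_zero, List.replicate_zero, List.nil_append, Bool.true_and, if_true] at hkey
    rw [List.foldl_map] at hkey
    rw [pvWin_eq] at hkey
    exact hkey

-- ===== VERDICT (by name: the statement is the Claim_ definition above) =====
theorem est_prononcable_spec : Claim_equal_est_prononcable := by
  intro mot _
  unfold Spec_est_prononcable
  exact pvMain mot
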